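-- pv_equiv track=rewrite | github.com/FrozenBerrys/Buggy_tetris | tetris.py | checklowerbound
-- ===== SOURCE A (Python) =====
-- def checklowerbound(rect):
--     x = 0
--     for i in rect:
--         if i[1] > x:
--             x = i[1]
--     if x >= 490:
--         return True
--     return False
-- ===== SOURCE B (Python) =====
-- def checklowerbound(rect):
--     return any(i[1] >= 490 for i in rect)
-- ===== Notes on version B (the rewrite author's own statement) =====
-- stated objective: idiomatic
-- what changed: Replaces the running-maximum accumulator plus final threshold comparison with a direct short-circuiting any() predicate test of each y-coordinate against 490.
import Mathlib
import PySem

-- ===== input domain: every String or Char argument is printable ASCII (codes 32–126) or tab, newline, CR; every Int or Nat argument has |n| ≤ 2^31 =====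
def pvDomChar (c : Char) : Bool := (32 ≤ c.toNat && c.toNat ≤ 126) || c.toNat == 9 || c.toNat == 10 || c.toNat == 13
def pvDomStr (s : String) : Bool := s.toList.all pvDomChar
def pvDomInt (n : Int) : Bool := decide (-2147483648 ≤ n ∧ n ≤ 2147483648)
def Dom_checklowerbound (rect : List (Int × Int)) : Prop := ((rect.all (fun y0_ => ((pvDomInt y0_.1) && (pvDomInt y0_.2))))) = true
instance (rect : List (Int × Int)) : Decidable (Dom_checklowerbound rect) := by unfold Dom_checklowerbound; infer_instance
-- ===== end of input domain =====

-- B replaces A's running-maximum accumulator + final comparison with a direct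
-- short-circuiting per-element test (any y ≥ 490); idiomatic, same cost.

-- ===== PORT A =====
-- x = 0; for i in rect: if i[1] > x: x = i[1];  then x >= 490
def checklowerbound (rect : List (Int × Int)) : Bool :=
  let x := rect.foldl (fun x i => if i.2 > x then i.2 else x) 0
  if x ≥ 490 then true else false

-- ===== PORT B =====
-- any(i[1] >= 490 for i in rect)
def checklowerbound_alt (rect : List (Int × Int)) : Bool :=
  rect.any (fun i => i.2 ≥ 490)

-- ===== PRECONDITION & SPEC =====
def Spec_checklowerbound (rect : List (Int × Int)) (out : Bool) : Prop := out = checklowerbound_alt rect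
instance (rect : List (Int × Int)) (out : Bool) : Decidable (Spec_checklowerbound rect out) := by unfold Spec_checklowerbound; infer_instance

-- ===== CLAIM (what is proved, stated in full; the proofs are below) =====
def Claim_equal_checklowerbound : Prop := ∀ (rect : List (Int × Int)), Dom_checklowerbound rect → Spec_checklowerbound rect (checklowerbound rect)

-- ===== LEMMAS AND PROOFS =====

-- The fold's result is ≥ 490 iff the seed is ≥ 490 or some element's y is ≥ 490.
theorem pv_fold_ge (rect : List (Int × Int)) (x : Int) :
    (decide (rect.foldl (fun x i => if i.2 > x then i.2 else x) x ≥ 490))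
      = (decide (x ≥ 490) || rect.any (fun i => i.2 ≥ 490)) := by
  induction rect generalizing x with
  | nil => simp
  | cons h t ih =>
    simp only [List.foldl_cons, List.any_cons]
    by_cases hx : h.2 > x <;>
      simp only [hx, if_pos, if_neg, not_false_eq_true, ih] <;>
      by_cases h1 : (490:Int) ≤ h.2 <;> by_cases h2 : (490:Int) ≤ x <;>
      simp [h1, h2] <;> omega

-- ===== VERDICT (by name: the statement is the Claim_ definition above) =====
theorem checklowerbound_spec : Claim_equal_checklowerbound := by
  intro rect _
  unfold Spec_checklowerbound checklowerbound checklowerbound_alt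
  have h := pv_fold_ge rect 0
  simp only [show ¬((0:Int) ≥ 490) by omega] at h
  simp only []
  split <;> simp_all <;> exact h
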